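-- pv_equiv track=rewrite | github.com/Beakerboy/VBA-Precompiler | src/vba_precompiler/compiler_visitor.py | split_nl
-- ===== SOURCE A (Python) =====
-- def split_nl(nl: str) -> list:
--     """
--     split a newline token into separate line-end characters.
--     """
--     num = len(nl)
--     i = 0
--     result = []
--     while i < num:
--         if num >= 2 and nl[i:i+2] == '\r\n':
--             result.append('\r\n')
--             i += 2
--         else:
--             result.append(nl[i:i+1])
--             i += 1
--     return result
-- ===== SOURCE B (Python) =====
-- import re
--
-- def split_nl(nl: str) -> list:
--     """
--     split a newline token into separate line-end characters.
--     """
--     return re.findall(r'\r\n|.', nl, re.DOTALL)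
-- ===== Notes on version B (the rewrite author's own statement) =====
-- stated objective: idiomatic
-- what changed: Replaces the manual index-advancing while-loop with a single regex findall tokenization whose alternation pairs CRLF first and otherwise takes one character (DOTALL).
import Mathlib
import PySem

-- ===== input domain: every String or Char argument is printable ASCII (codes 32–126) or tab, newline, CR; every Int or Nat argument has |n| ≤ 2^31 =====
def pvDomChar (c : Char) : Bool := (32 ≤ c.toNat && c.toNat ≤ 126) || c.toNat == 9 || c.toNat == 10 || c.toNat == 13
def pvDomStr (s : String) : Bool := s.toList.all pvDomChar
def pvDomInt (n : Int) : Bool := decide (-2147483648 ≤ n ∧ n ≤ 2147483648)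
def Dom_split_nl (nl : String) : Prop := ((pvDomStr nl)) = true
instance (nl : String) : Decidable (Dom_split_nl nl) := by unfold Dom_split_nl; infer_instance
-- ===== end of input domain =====

-- B replaces A's index-advancing while-loop by a regex tokenization (r'\r\n|.' with DOTALL),
-- ported as direct pattern-matching recursion on the character list; same values, idiomatic.

-- ===== PORT A =====
-- while i < num: if num >= 2 and nl[i:i+2] == '\r\n' … else …
def split_nl_go (nl : String) (num i : Int) : List String :=
  if i < num then
    if 2 ≤ num ∧ PySem.Str.slice nl (some i) (some (i + 2)) = "\r\n" then
      "\r\n" :: split_nl_go nl num (i + 2)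
    else
      PySem.Str.slice nl (some i) (some (i + 1)) :: split_nl_go nl num (i + 1)
  else []
termination_by (num - i).toNat
decreasing_by all_goals omega

def split_nl (nl : String) : List String :=
  split_nl_go nl (PySem.Str.len nl) 0

-- ===== PORT B =====
-- the regex r'\r\n|.' (DOTALL): at each position, match '\r\n' if it is next, else one character
def split_nl_alt_go : List Char → List String
  | '\r' :: '\n' :: rest => "\r\n" :: split_nl_alt_go rest
  | c :: rest => String.ofList [c] :: split_nl_alt_go rest
  | [] => []

def split_nl_alt (nl : String) : List String := split_nl_alt_go nl.toList

-- ===== PRECONDITION & SPEC =====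
def Spec_split_nl (nl : String) (out : List String) : Prop := out = split_nl_alt nl
instance (nl : String) (out : List String) : Decidable (Spec_split_nl nl out) := by unfold Spec_split_nl; infer_instance

-- ===== CLAIM (what is proved, stated in full; the proofs are below) =====
def Claim_equal_split_nl : Prop := ∀ (nl : String), Dom_split_nl nl → Spec_split_nl nl (split_nl nl)

-- ===== LEMMAS AND PROOFS =====

theorem split_nl_go_eq (nl : String) :
    ∀ (k i : Nat), nl.toList.length - i = k →
      split_nl_go nl (nl.toList.length : Int) (i : Int) = split_nl_alt_go (nl.toList.drop i) := by
  intro k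
  induction k using Nat.strong_induction_on with
  | _ k ih =>
    intro i hk
    rw [split_nl_go]
    rcases Nat.lt_or_ge i nl.toList.length with hlt | hge
    · obtain ⟨c, rest, hd⟩ : ∃ c rest, nl.toList.drop i = c :: rest := by
        cases hd : nl.toList.drop i with
        | nil =>
          have := List.drop_eq_nil_iff.mp hd
          omega
        | cons c rest => exact ⟨c, rest, rfl⟩
      have hdl : nl.toList.length - i = rest.length + 1 := by
        have := congrArg List.length hd
        simp only [List.length_drop, List.length_cons] at this
        omega
      have hs2 : (PySem.Str.slice nl (some (i : Int)) (some ((i : Int) + 2))).toList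
          = (nl.toList.drop i).take 2 := by
        rw [PySem.Str.toList_slice]
        have h2 : ((i : Int) + 2) = ((i : Int) + ((2 : Nat) : Int)) := by norm_cast
        simp only [PySem.Chars.slice_eq_listSlice, h2, PySem.List.slice_natCast_add]
      have hs1 : (PySem.Str.slice nl (some (i : Int)) (some ((i : Int) + 1))).toList
          = (nl.toList.drop i).take 1 := by
        rw [PySem.Str.toList_slice]
        have h1 : ((i : Int) + 1) = ((i : Int) + ((1 : Nat) : Int)) := by norm_cast
        simp only [PySem.Chars.slice_eq_listSlice, h1, PySem.List.slice_natCast_add]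
      rw [if_pos (by exact_mod_cast hlt)]
      by_cases hpair : c = '\r' ∧ ∃ r', rest = '\n' :: r'
      · obtain ⟨hc, r', hr⟩ := hpair
        subst hc hr
        have hcond : 2 ≤ (nl.toList.length : Int) ∧
            PySem.Str.slice nl (some (i : Int)) (some ((i : Int) + 2)) = "\r\n" := by
          constructor
          · have h2 : 2 ≤ nl.toList.length := by simp only [List.length_cons] at hdl; omega
            exact_mod_cast h2
          · apply String.toList_inj.mp
            rw [hs2, hd]
            rfl
        rw [if_pos hcond, hd]
        show "\r\n" :: split_nl_go nl (nl.toList.length : Int) ((i : Int) + 2)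
            = "\r\n" :: split_nl_alt_go r'
        have hdrop2 : nl.toList.drop (i + 2) = r' := by
          rw [← List.drop_drop, hd]
          rfl
        have hrec := ih (nl.toList.length - (i + 2)) (by simp only [List.length_cons] at hdl; omega) (i + 2) rfl
        rw [hdrop2] at hrec
        have hc2 : ((i : Int) + 2) = (((i + 2 : Nat)) : Int) := by push_cast; ring
        rw [hc2, hrec]
      · have hcond : ¬ (2 ≤ (nl.toList.length : Int) ∧
            PySem.Str.slice nl (some (i : Int)) (some ((i : Int) + 2)) = "\r\n") := by
          rintro ⟨-, he⟩
          have := congrArg String.toList he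
          rw [hs2, hd] at this
          cases rest with
          | nil => simp at this
          | cons d r'' =>
            simp [List.take] at this
            exact hpair ⟨this.1, r'', by rw [this.2]⟩
        rw [if_neg hcond, hd]
        have halt : split_nl_alt_go (c :: rest) = String.ofList [c] :: split_nl_alt_go rest := by
          rw [split_nl_alt_go.eq_def]
          split
          · rename_i r' heq
            injection heq with h1 h2
            exact absurd ⟨h1, r', h2⟩ hpair
          · rename_i x c2 r2 hguard hcc
            injection hcc with h1 h2
            rw [h1, h2]
          · rename_i hnil
            exact absurd hnil (List.cons_ne_nil c rest)
        rw [halt]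
        have hslice1 : PySem.Str.slice nl (some (i : Int)) (some ((i : Int) + 1))
            = String.ofList [c] := by
          apply String.toList_inj.mp
          rw [hs1, hd]
          simp
        rw [hslice1]
        have hdrop1 : nl.toList.drop (i + 1) = rest := by
          rw [← List.drop_drop, hd]
          rfl
        have hrec := ih (nl.toList.length - (i + 1)) (by omega) (i + 1) rfl
        rw [hdrop1] at hrec
        have hc1 : ((i : Int) + 1) = (((i + 1 : Nat)) : Int) := by push_cast; ring
        rw [hc1, hrec]
    · rw [if_neg (by exact_mod_cast Nat.not_lt.mpr hge)]
      rw [List.drop_eq_nil_iff.mpr hge]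
      rfl

-- ===== VERDICT (by name: the statement is the Claim_ definition above) =====
theorem split_nl_spec : Claim_equal_split_nl := by
  intro nl _
  unfold Spec_split_nl split_nl split_nl_alt
  have hlen : PySem.Str.len nl = (nl.toList.length : Int) := by
    simp [PySem.Str.len_eq]
  rw [hlen]
  have := split_nl_go_eq nl (nl.toList.length - 0) 0 rfl
  simpa using this
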